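-- pv_equiv track=rewrite | github.com/casey451/Havasu-app | crawler/sources/havasu_parks/parse_schedule.py | _split_day_sections
-- ===== SOURCE A (Python) =====
-- _DAY_NAMES = frozenset(
--     ("monday", "tuesday", "wednesday", "thursday", "friday", "saturday", "sunday")
-- )
--
-- def _weekday_from_header(line: str) -> str | None:
--     w = line.strip().lower().rstrip(":").strip()
--     if w in _DAY_NAMES:
--         return line.strip().title()
--     return None
--
-- def _split_day_sections(lines: list[str]) -> list[tuple[str, list[str]]]:
--     """Split nav preamble, then (weekday, lines until next weekday)."""
--     first = None
--     for idx, line in enumerate(lines):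
--         if _weekday_from_header(line):
--             first = idx
--             break
--     if first is None:
--         return []
--
--     sections: list[tuple[str, list[str]]] = []
--     i = first
--     while i < len(lines):
--         wd = _weekday_from_header(lines[i])
--         if wd is None:
--             i += 1
--             continue
--         buf: list[str] = []
--         i += 1
--         while i < len(lines) and _weekday_from_header(lines[i]) is None:
--             buf.append(lines[i])
--             i += 1
--         sections.append((wd, buf))
--     return sections
-- ===== SOURCE B (Python) =====
-- _DAY_NAMES = frozenset(
--     ("monday", "tuesday", "wednesday", "thursday", "friday", "saturday", "sunday")
-- )
--
-- def _weekday_from_header(line: str) -> str | None: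
--     w = line.strip().lower().rstrip(":").strip()
--     if w in _DAY_NAMES:
--         return line.strip().title()
--     return None
--
-- def _split_day_sections(lines: list[str]) -> list[tuple[str, list[str]]]:
--     """One reversed pass: lines before the next header accumulate in buf;
--     a header flushes buf as its section; leftover buf is the discarded preamble."""
--     sections: list[tuple[str, list[str]]] = []
--     buf: list[str] = []
--     for line in reversed(lines):
--         wd = _weekday_from_header(line)
--         if wd is None:
--             buf.append(line)
--         else:
--             sections.append((wd, buf[::-1]))
--             buf = []
--     sections.reverse()
--     return sections
-- ===== Notes on version B (the rewrite author's own statement) =====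
-- stated objective: simpler
-- what changed: Replaces A's find-first-header loop plus nested forward index loops with a single reversed pass that accumulates the current buffer and flushes it into a section at each header, reversing once at the end.
import Mathlib
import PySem

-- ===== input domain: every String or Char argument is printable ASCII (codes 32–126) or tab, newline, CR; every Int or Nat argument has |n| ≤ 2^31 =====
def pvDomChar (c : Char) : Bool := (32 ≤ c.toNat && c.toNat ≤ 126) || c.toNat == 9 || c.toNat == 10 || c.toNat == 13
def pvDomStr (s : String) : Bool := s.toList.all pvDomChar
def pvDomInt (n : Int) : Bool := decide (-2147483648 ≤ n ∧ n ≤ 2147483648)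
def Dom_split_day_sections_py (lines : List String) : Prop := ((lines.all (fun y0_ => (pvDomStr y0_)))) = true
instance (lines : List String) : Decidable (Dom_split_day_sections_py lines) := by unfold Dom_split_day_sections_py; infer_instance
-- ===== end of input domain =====

-- B replaces A's find-first-header loop plus nested forward index loops with one reversed
-- accumulator pass (simpler decomposition; same cost; return-value equivalence).

-- ===== PORT A =====
def pvDayNames : List String := ["monday", "tuesday", "wednesday", "thursday", "friday", "saturday", "sunday"]

-- hand port of str.rstrip(":"): drop trailing ':' characters (exact)
def pvRstripColon (cs : List Char) : List Char := (cs.reverse.dropWhile (· == ':')).reverse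

-- hand port of str.title(): on the printable-ASCII domain the cased characters are exactly
-- the ASCII letters, so a letter is uppercased iff the previous character is not a letter (exact there)
def pvTitleGo : List Char → Bool → List Char
  | [], _ => []
  | c :: rest, prev =>
    (if PySem.Chars.isalpha c then
        (if prev then PySem.Chars.lowerChar c else PySem.Chars.upperChar c)
      else c) :: pvTitleGo rest (PySem.Chars.isalpha c)

-- port of _weekday_from_header (shared module helper, used by both A and B)
def weekday_from_header_py (line : String) : Option String :=
  let w := String.ofList (PySem.Chars.strip (pvRstripColon (PySem.Chars.lower (PySem.Chars.strip line.toList))))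
  if pvDayNames.contains w then
    some (String.ofList (pvTitleGo (PySem.Chars.strip line.toList) false))
  else none

-- A's first loop: index of the first header line
def pvFirstHeader : List String → Option Nat
  | [] => none
  | l :: rest =>
    if (weekday_from_header_py l).isSome then some 0
    else (pvFirstHeader rest).map (· + 1)

-- A's inner while loop: collect lines until the next header
def pvCollectBuf : List String → List String × List String
  | [] => ([], [])
  | l :: rest =>
    if (weekday_from_header_py l).isSome then ([], l :: rest)
    else
      let br := pvCollectBuf rest
      (l :: br.1, br.2)

-- A's outer while loop; the fuel only bounds the iteration count (each iteration consumes
-- at least one line, and `while i < len(lines)` runs at most `lines.length` iterations)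
def pvSectionsAGo : Nat → List String → List (String × List String)
  | 0, _ => []
  | _ + 1, [] => []
  | fuel + 1, l :: rest =>
    match weekday_from_header_py l with
    | none => pvSectionsAGo fuel rest
    | some wd =>
      let br := pvCollectBuf rest
      (wd, br.1) :: pvSectionsAGo fuel br.2

def split_day_sections_py (lines : List String) : List (String × List String) :=
  match pvFirstHeader lines with
  | none => []
  | some first => pvSectionsAGo lines.length (lines.drop first)

-- ===== PORT B =====
def split_day_sections_py_alt (lines : List String) : List (String × List String) :=
  let r := lines.reverse.foldl
    (fun (acc : List (String × List String) × List String) line =>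
      match weekday_from_header_py line with
      | none => (acc.1, acc.2 ++ [line])
      | some wd => (acc.1 ++ [(wd, acc.2.reverse)], []))
    ([], [])
  r.1.reverse

-- ===== PRECONDITION & SPEC =====
def Spec_split_day_sections_py (lines : List String) (out : List (String × List String)) : Prop := out = split_day_sections_py_alt lines
instance (lines : List String) (out : List (String × List String)) : Decidable (Spec_split_day_sections_py lines out) := by unfold Spec_split_day_sections_py; infer_instance

-- ===== CLAIM (what is proved, stated in full; the proofs are below) =====
def Claim_equal_split_day_sections_py : Prop := ∀ (lines : List String), Dom_split_day_sections_py lines → Spec_split_day_sections_py lines (split_day_sections_py lines)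

-- ===== LEMMAS AND PROOFS =====

-- proof-side reference function: sections by structural recursion
def pvS : List String → List (String × List String)
  | [] => []
  | l :: rest =>
    match weekday_from_header_py l with
    | none => pvS rest
    | some wd => (wd, rest.takeWhile (fun x => (weekday_from_header_py x).isNone)) :: pvS rest

theorem pvCollectBuf_eq (xs : List String) :
    pvCollectBuf xs = (xs.takeWhile (fun l => (weekday_from_header_py l).isNone),
                       xs.dropWhile (fun l => (weekday_from_header_py l).isNone)) := by
  induction xs with
  | nil => rfl
  | cons l rest ih =>
    simp only [pvCollectBuf, List.takeWhile, List.dropWhile, ih]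
    cases h : weekday_from_header_py l <;> simp

theorem pvS_skip (pre ys : List String)
    (h : ∀ l ∈ pre, weekday_from_header_py l = none) :
    pvS (pre ++ ys) = pvS ys := by
  induction pre with
  | nil => rfl
  | cons l rest ih =>
    have hl : weekday_from_header_py l = none := h l (by simp)
    rw [List.cons_append, pvS, hl]
    exact ih (fun x hx => h x (by simp [hx]))

theorem pvS_dropWhile (xs : List String) :
    pvS (xs.dropWhile (fun l => (weekday_from_header_py l).isNone)) = pvS xs := by
  conv_rhs => rw [← List.takeWhile_append_dropWhile (p := fun l => (weekday_from_header_py l).isNone) (l := xs)]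
  rw [pvS_skip]
  intro l hl
  have := List.mem_takeWhile_imp hl
  simpa [Option.isNone_iff_eq_none] using this

theorem pvSectionsAGo_eq : ∀ (fuel : Nat) (xs : List String), xs.length ≤ fuel →
    pvSectionsAGo fuel xs = pvS xs := by
  intro fuel
  induction fuel with
  | zero =>
    intro xs h
    rw [Nat.le_zero, List.length_eq_zero_iff] at h
    subst h; rfl
  | succ f ih =>
    intro xs h
    cases xs with
    | nil => rfl
    | cons l rest =>
      simp only [List.length_cons, Nat.succ_le_succ_iff] at h
      rw [pvSectionsAGo, pvS]
      cases hl : weekday_from_header_py l with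
      | none => exact ih rest h
      | some wd =>
        simp only [pvCollectBuf_eq]
        rw [ih _ (le_trans (by simpa using List.length_dropWhile_le _ _) h), pvS_dropWhile]

theorem split_day_sections_py_eq_pvS (lines : List String) :
    split_day_sections_py lines = pvS lines := by
  induction lines with
  | nil => rfl
  | cons l rest ih =>
    by_cases hp : (weekday_from_header_py l).isSome
    · rw [split_day_sections_py]
      simp only [pvFirstHeader, hp, if_pos, List.drop_zero]
      exact pvSectionsAGo_eq _ _ (le_refl _)
    · have hn : weekday_from_header_py l = none := by
        cases h : weekday_from_header_py l
        · rfl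
        · simp [h] at hp
      rw [pvS, hn]
      rw [split_day_sections_py] at ih ⊢
      simp only [pvFirstHeader, hp, if_neg, Bool.false_eq_true, not_false_eq_true] at *
      cases hf : pvFirstHeader rest with
      | none => simp only [hf, Option.map_none] at ih ⊢; exact ih
      | some k =>
        simp only [hf, Option.map_some] at ih ⊢
        rw [List.drop_succ_cons]
        rw [pvSectionsAGo_eq _ _ (by simp only [List.length_drop, List.length_cons]; omega)] at ih ⊢
        exact ih

theorem pvFoldrB_eq (lines : List String) :
    lines.foldr
      (fun line (acc : List (String × List String) × List String) =>
        match weekday_from_header_py line with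
        | none => (acc.1, acc.2 ++ [line])
        | some wd => (acc.1 ++ [(wd, acc.2.reverse)], [])) ([], [])
    = ((pvS lines).reverse,
       (lines.takeWhile (fun l => (weekday_from_header_py l).isNone)).reverse) := by
  induction lines with
  | nil => rfl
  | cons l rest ih =>
    rw [List.foldr_cons, ih]
    cases h : weekday_from_header_py l with
    | none =>
      simp only []
      rw [pvS, h]
      simp [List.takeWhile, h]
    | some wd =>
      simp only []
      rw [pvS, h]
      simp [List.takeWhile, h]

-- ===== VERDICT (by name: the statement is the Claim_ definition above) =====
theorem split_day_sections_py_spec : Claim_equal_split_day_sections_py := by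
  intro lines _
  show split_day_sections_py lines = split_day_sections_py_alt lines
  rw [split_day_sections_py_eq_pvS, split_day_sections_py_alt]
  simp only [List.foldl_reverse]
  rw [pvFoldrB_eq]
  simp
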